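-- pv_equiv track=rewrite | github.com/JoMariRaphaelLMangahas/2024-2025-BSCPE-2-6-DSA-Final_Project | Binary_Tree_Traversal.py | handle_level_click
-- ===== SOURCE A (Python) =====
-- def handle_level_click(pos, screen_width, screen_height, max_levels):
--     # Button dimensions and location
--     button_width, button_height = 40, 40
--     total_width = button_width * max_levels + (max_levels - 1) * 10
--     start_x = (screen_width - total_width) // 2
--     y = screen_height - button_height - 80  # Same y-coordinate as the level selector
--
--     for i in range(1, max_levels + 1):
--         x = start_x + (i - 1) * (button_width + 10)
--         if x <= pos[0] <= x + button_width and y <= pos[1] <= y + button_height: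
--             return i
--     return None
-- ===== SOURCE B (Python) =====
-- def handle_level_click(pos, screen_width, screen_height, max_levels):
--     # O(1): reject outside the button row first, then divmod the x-offset by the
--     # 50px pitch to get the single candidate slot (remainder > 40 = the gap).
--     px, py = pos
--     top = screen_height - 120
--     if not (top <= py <= top + 40):
--         return None
--     pitch = 50
--     left = (screen_width - (pitch * max_levels - 10)) // 2
--     q, r = divmod(px - left, pitch)
--     if 0 <= q < max_levels and r <= 40:
--         return q + 1
--     return None
-- ===== Notes on version B (the rewrite author's own statement) =====
-- stated objective: faster
-- what changed: B replaces A's linear scan over all max_levels button rectangles with an early y-band rejection followed by a single divmod of the x-offset by the 50px pitch, returning the one candidate slot (remainder > 40 rejects gap clicks).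
import Mathlib
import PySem

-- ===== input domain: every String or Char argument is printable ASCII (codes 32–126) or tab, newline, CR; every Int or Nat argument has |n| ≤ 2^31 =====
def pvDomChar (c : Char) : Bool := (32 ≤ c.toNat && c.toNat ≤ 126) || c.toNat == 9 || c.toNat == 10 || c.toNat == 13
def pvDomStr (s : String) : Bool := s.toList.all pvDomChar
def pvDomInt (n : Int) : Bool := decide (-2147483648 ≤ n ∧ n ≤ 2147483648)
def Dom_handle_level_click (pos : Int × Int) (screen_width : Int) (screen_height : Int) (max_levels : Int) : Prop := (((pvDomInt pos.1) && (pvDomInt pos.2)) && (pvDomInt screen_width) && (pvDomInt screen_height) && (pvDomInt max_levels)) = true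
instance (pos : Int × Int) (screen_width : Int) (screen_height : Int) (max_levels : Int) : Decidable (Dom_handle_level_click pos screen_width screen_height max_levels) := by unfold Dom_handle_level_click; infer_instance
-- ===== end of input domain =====

-- B replaces A's linear scan over the buttons by an early y-band rejection and a
-- single divmod of the x-offset by the 50px pitch (faster: O(1) vs O(max_levels)).

-- ===== PORT A =====
-- A scans i = 1 .. max_levels and returns the first i whose button rectangle
-- contains pos; `List.find?` over the Python range is that loop with its early return.
def handle_level_click (pos : Int × Int) (screen_width : Int) (screen_height : Int) (max_levels : Int) : Option Int :=
  let button_width : Int := 40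
  let button_height : Int := 40
  let total_width := button_width * max_levels + (max_levels - 1) * 10
  let start_x := PySem.Int.floordiv (screen_width - total_width) 2
  let y := screen_height - button_height - 80
  (PySem.List.pyRange 1 (max_levels + 1) 1).find? (fun i =>
    let x := start_x + (i - 1) * (button_width + 10)
    decide (x ≤ pos.1 ∧ pos.1 ≤ x + button_width ∧ y ≤ pos.2 ∧ pos.2 ≤ y + button_height))

-- ===== PORT B =====
def handle_level_click_alt (pos : Int × Int) (screen_width : Int) (screen_height : Int) (max_levels : Int) : Option Int :=
  let px := pos.1
  let py := pos.2
  let top := screen_height - 120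
  if ¬ (top ≤ py ∧ py ≤ top + 40) then
    none
  else
    let pitch : Int := 50
    let left := PySem.Int.floordiv (screen_width - (pitch * max_levels - 10)) 2
    match PySem.Int.divmod? (px - left) pitch with
    | none => none
    | some (q, r) => if 0 ≤ q ∧ q < max_levels ∧ r ≤ 40 then some (q + 1) else none

-- ===== PRECONDITION & SPEC =====
def Spec_handle_level_click (pos : Int × Int) (screen_width : Int) (screen_height : Int) (max_levels : Int) (out : Option Int) : Prop := out = handle_level_click_alt pos screen_width screen_height max_levels
instance (pos : Int × Int) (screen_width : Int) (screen_height : Int) (max_levels : Int) (out : Option Int) : Decidable (Spec_handle_level_click pos screen_width screen_height max_levels out) := by unfold Spec_handle_level_click; infer_instance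

-- ===== CLAIM (what is proved, stated in full; the proofs are below) =====
def Claim_equal_handle_level_click : Prop := ∀ (pos : Int × Int) (screen_width : Int) (screen_height : Int) (max_levels : Int), Dom_handle_level_click pos screen_width screen_height max_levels → Spec_handle_level_click pos screen_width screen_height max_levels (handle_level_click pos screen_width screen_height max_levels)

-- ===== LEMMAS AND PROOFS =====

-- A's scan over the range 1..max_levels equals the closed form: the predicate
-- holds for at most one index, namely (dx // 50) + 1, and only when the
-- remainder of dx by 50 is at most 40 (the click is not in the 10px gap).
theorem find?_range_closed (dx : Int) (yc : Bool) (a b : Int) :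
    (PySem.List.pyRange a b 1).find?
        (fun i => decide ((i - 1) * 50 ≤ dx ∧ dx ≤ (i - 1) * 50 + 40) && yc)
      = (if yc = true ∧ dx - PySem.Int.floordiv dx 50 * 50 ≤ 40 ∧
            a ≤ PySem.Int.floordiv dx 50 + 1 ∧ PySem.Int.floordiv dx 50 + 1 < b
          then some (PySem.Int.floordiv dx 50 + 1) else none) := by
  have hdiv : PySem.Int.floordiv dx 50 * 50 + PySem.Int.mod dx 50 = dx :=
    PySem.Int.floordiv_mul_add_mod dx 50
  have hmod : 0 ≤ PySem.Int.mod dx 50 ∧ PySem.Int.mod dx 50 < 50 :=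
    ⟨PySem.Int.mod_nonneg dx (by norm_num), PySem.Int.mod_lt dx (by norm_num)⟩
  set q := PySem.Int.floordiv dx 50 with hq
  by_cases hba : b ≤ a
  · rw [PySem.List.pyRange_one_eq_nil hba]
    simp only [List.find?_nil]
    rw [if_neg]; omega
  · have hab : a < b := by omega
    generalize hn : (b - a).toNat = n
    induction n generalizing a with
    | zero => omega
    | succ n ih =>
      rw [PySem.List.pyRange_one_cons hab, List.find?_cons]
      by_cases hpa : ((a - 1) * 50 ≤ dx ∧ dx ≤ (a - 1) * 50 + 40) ∧ yc = true
      · have hqa : q = a - 1 := by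
          rw [hq, PySem.Int.floordiv_eq_iff_of_pos (by norm_num : (0:Int) < 50)]
          omega
        have hd : (decide ((a - 1) * 50 ≤ dx ∧ dx ≤ (a - 1) * 50 + 40) && yc) = true := by
          simp [hpa.1.1, hpa.1.2, hpa.2]
        simp only [hd]
        rw [if_pos ⟨hpa.2, by omega, by omega, by omega⟩]
        exact congrArg some (by omega)
      · have hd : (decide ((a - 1) * 50 ≤ dx ∧ dx ≤ (a - 1) * 50 + 40) && yc) = false := by
          cases hy : yc with
          | true => simp only [Bool.and_true]; exact decide_eq_false (fun hc => hpa ⟨hc, hy⟩)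
          | false => simp
        simp only [hd]
        by_cases hb1 : b ≤ a + 1
        · rw [PySem.List.pyRange_one_eq_nil hb1]
          simp only [List.find?_nil]
          rw [if_neg]
          intro ⟨h1, h2, h3, h4⟩
          exact hpa ⟨⟨by omega, by omega⟩, h1⟩
        · rw [ih (a + 1) (by omega) (by omega) (by omega)]
          by_cases hqa : q + 1 = a
          · rw [if_neg (by omega), if_neg]
            intro ⟨h1, h2, h3, h4⟩
            exact hpa ⟨⟨by omega, by omega⟩, h1⟩
          · exact if_congr (by constructor <;> (intro ⟨h1, h2, h3, h4⟩; exact ⟨h1, h2, by omega, h4⟩)) rfl rfl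

theorem handle_level_click_eq (pos : Int × Int) (screen_width : Int) (screen_height : Int) (max_levels : Int) :
    handle_level_click pos screen_width screen_height max_levels
      = handle_level_click_alt pos screen_width screen_height max_levels := by
  unfold handle_level_click handle_level_click_alt
  simp only [show ((40:Int) + 10) = 50 from by norm_num]
  have harg : 40 * max_levels + (max_levels - 1) * 10 = 50 * max_levels - 10 := by ring
  rw [harg]
  set sx := PySem.Int.floordiv (screen_width - (50 * max_levels - 10)) 2 with hsx
  set dx := pos.1 - sx with hdx
  have hyc : ∀ i : Int,
      (decide (sx + (i - 1) * 50 ≤ pos.1 ∧ pos.1 ≤ sx + (i - 1) * 50 + 40 ∧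
        screen_height - 40 - 80 ≤ pos.2 ∧ pos.2 ≤ screen_height - 40 - 80 + 40))
      = ((decide ((i - 1) * 50 ≤ dx ∧ dx ≤ (i - 1) * 50 + 40)) &&
          decide (screen_height - 40 - 80 ≤ pos.2 ∧ pos.2 ≤ screen_height - 40 - 80 + 40)) := by
    intro i
    simp only [← Bool.decide_and, decide_eq_decide]
    omega
  simp only [hyc]
  rw [find?_range_closed dx _ 1 (max_levels + 1)]
  have hdm : PySem.Int.divmod? dx 50 = some (PySem.Int.floordiv dx 50, PySem.Int.mod dx 50) := by
    simp [PySem.Int.divmod?, PySem.Int.floordiv, PySem.Int.mod]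
  have hdiv : PySem.Int.floordiv dx 50 * 50 + PySem.Int.mod dx 50 = dx :=
    PySem.Int.floordiv_mul_add_mod dx 50
  by_cases hy : screen_height - 120 ≤ pos.2 ∧ pos.2 ≤ screen_height - 120 + 40
  · rw [if_neg (not_not_intro hy), hdm]
    have hyd : decide (screen_height - 40 - 80 ≤ pos.2 ∧ pos.2 ≤ screen_height - 40 - 80 + 40) = true := by
      simp only [decide_eq_true_iff]; omega
    refine if_congr ?_ rfl rfl
    simp only [hyd]
    constructor
    · rintro ⟨_, h2, h3, h4⟩; exact ⟨by omega, by omega, by omega⟩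
    · rintro ⟨h1, h2, h3⟩; exact ⟨trivial, by omega, by omega, by omega⟩
  · rw [if_pos hy, if_neg]
    rintro ⟨h1, -⟩
    simp only [decide_eq_true_iff] at h1
    omega

-- ===== VERDICT (by name: the statement is the Claim_ definition above) =====
theorem handle_level_click_spec : Claim_equal_handle_level_click := by
  intro pos sw sh ml _
  exact handle_level_click_eq pos sw sh ml
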